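-- pv_equiv track=rewrite | github.com/alexandraback/datacollection | solutions_2652486_0/Python/FatAlex/c.py | gen_cases_r
-- ===== SOURCE A (Python) =====
-- def gen_cases_r(N,fa):
--     if N==0:
--         return [[]]
--     scs=gen_cases_r(N-1,fa)
--     cs=[]
--     for sc in scs:
--         for f in fa:
--             cs.append(sc+[f])
--     return cs
-- ===== SOURCE B (Python) =====
-- def gen_cases_r(N, fa):
--     result = [[]]
--     for _ in range(N):
--         result = [sc + [f] for sc in result for f in fa]
--     return result
-- ===== Notes on version B (the rewrite author's own statement) =====
-- stated objective: simpler
-- what changed: Replaces the recursion on N by an iterative bottom-up build: start from [[]] and N times expand every prefix by every letter of fa with a comprehension (same nesting order, so the output order is identical).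
import Mathlib
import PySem

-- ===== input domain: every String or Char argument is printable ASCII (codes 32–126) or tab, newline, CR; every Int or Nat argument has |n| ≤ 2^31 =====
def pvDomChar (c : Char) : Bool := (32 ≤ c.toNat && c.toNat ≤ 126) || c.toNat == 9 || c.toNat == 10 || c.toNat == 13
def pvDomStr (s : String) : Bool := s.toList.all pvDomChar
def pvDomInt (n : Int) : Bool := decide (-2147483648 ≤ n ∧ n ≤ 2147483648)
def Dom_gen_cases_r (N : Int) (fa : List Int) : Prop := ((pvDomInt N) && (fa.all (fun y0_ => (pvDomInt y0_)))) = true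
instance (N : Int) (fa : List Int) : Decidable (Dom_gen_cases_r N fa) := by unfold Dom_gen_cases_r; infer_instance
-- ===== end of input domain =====

-- B replaces A's recursion on N by an iterative bottom-up build (same expansion order): simpler decomposition, same cost.

-- ===== PORT A =====
-- A recurses on N; for N < 0 the Python recursion never terminates (excluded by Pre_),
-- so the Lean port recurses on the natural number N.toNat, which coincides with A for N ≥ 0.
def gen_cases_rA : Nat → List Int → List (List Int)
  | 0, _ => [[]]
  | n + 1, fa =>
      let scs := gen_cases_rA n fa
      -- 'cs.append(x)' ported with the cons-and-reverse idiom (same loop, same order, linear time)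
      (scs.foldl (fun cs sc => fa.foldl (fun cs f => (sc ++ [f]) :: cs) cs) []).reverse

def gen_cases_r (N : Int) (fa : List Int) : List (List Int) :=
  gen_cases_rA N.toNat fa

-- ===== PORT B =====
def gen_cases_r_alt (N : Int) (fa : List Int) : List (List Int) :=
  (List.range N.toNat).foldl
    (fun result _ => result.flatMap (fun sc => fa.map (fun f => sc ++ [f]))) [[]]

-- ===== PRECONDITION & SPEC =====
-- Pre_ excludes N < 0, on which Python A exceeds the recursion limit (RecursionError).
def Pre_gen_cases_r (N : Int) (fa : List Int) : Prop := 0 ≤ N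
instance (N : Int) (fa : List Int) : Decidable (Pre_gen_cases_r N fa) := by unfold Pre_gen_cases_r; infer_instance
def pvWitness_gen_cases_r : Int × List Int := (2, [1, 2])

def Spec_gen_cases_r (N : Int) (fa : List Int) (out : List (List Int)) : Prop := out = gen_cases_r_alt N fa
instance (N : Int) (fa : List Int) (out : List (List Int)) : Decidable (Spec_gen_cases_r N fa out) := by unfold Spec_gen_cases_r; infer_instance

-- ===== CLAIM (what is proved, stated in full; the proofs are below) =====
def Claim_equal_gen_cases_r : Prop := ∀ (N : Int) (fa : List Int), Dom_gen_cases_r N fa → Pre_gen_cases_r N fa → Spec_gen_cases_r N fa (gen_cases_r N fa)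

-- ===== LEMMAS AND PROOFS =====

-- An append-by-cons loop accumulates the mapped list in reverse.
theorem foldl_cons_map (fa : List Int) (g : Int → List Int) :
    ∀ (acc : List (List Int)),
      fa.foldl (fun cs f => g f :: cs) acc = (fa.map g).reverse ++ acc := by
  induction fa with
  | nil => intro acc; rfl
  | cons f rest ih => intro acc; simp [ih]

-- One expansion step of A equals B's comprehension step.
theorem step_eq (scs : List (List Int)) (fa : List Int) :
    (scs.foldl (fun cs sc => fa.foldl (fun cs f => (sc ++ [f]) :: cs) cs) []).reverse =
    scs.flatMap (fun sc => fa.map (fun f => sc ++ [f])) := by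
  have h : ∀ (acc : List (List Int)),
      scs.foldl (fun cs sc => fa.foldl (fun cs f => (sc ++ [f]) :: cs) cs) acc =
      (scs.flatMap (fun sc => fa.map (fun f => sc ++ [f]))).reverse ++ acc := by
    induction scs with
    | nil => intro acc; rfl
    | cons sc rest ih =>
      intro acc
      rw [List.foldl_cons, foldl_cons_map, ih]
      simp
  rw [h []]
  simp

theorem gen_eq (n : Nat) (fa : List Int) :
    gen_cases_rA n fa =
    (List.range n).foldl
      (fun result _ => result.flatMap (fun sc => fa.map (fun f => sc ++ [f]))) [[]] := by
  induction n with
  | zero => rfl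
  | succ n ih =>
    simp only [gen_cases_rA, step_eq, ih, List.range_succ, List.foldl_append, List.foldl_cons,
      List.foldl_nil]

-- ===== VERDICT (by name: the statement is the Claim_ definition above) =====
theorem gen_cases_r_spec : Claim_equal_gen_cases_r := by
  intro N fa _ _
  unfold Spec_gen_cases_r gen_cases_r gen_cases_r_alt
  exact gen_eq N.toNat fa
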